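-- pv_equiv track=rewrite | github.com/Suraj-Mohite/Daily_codeing_practice | Daily_Code/All_types/q1_twoSum.py | getXandY
-- ===== SOURCE A (Python) =====
-- def getXandY(arr):
--     set1=set()
--     ans=[]
--     for i in arr:
--         set1.add(2*i)
--     for i in arr:
--         if i in set1:
--             ans.append([i,i//2])
--     return ans
-- ===== SOURCE B (Python) =====
-- def _bsearch(srt, x):
--     lo, hi = 0, len(srt)
--     while lo < hi:
--         mid = (lo + hi) // 2
--         if srt[mid] < x:
--             lo = mid + 1
--         else:
--             hi = mid
--     return lo < len(srt) and srt[lo] == x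
--
--
-- def getXandY(arr):
--     srt = sorted(arr)
--     ans = []
--     for i in arr:
--         if i % 2 == 0 and _bsearch(srt, i // 2):
--             ans.append([i, i // 2])
--     return ans
-- ===== Notes on version B (the rewrite author's own statement) =====
-- stated objective: alternative
-- what changed: B replaces A's hash set of doubled values by sorting the array once and testing 'i is a double of some element' as parity plus a hand-written binary search for i//2 in the sorted copy.
import Mathlib
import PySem

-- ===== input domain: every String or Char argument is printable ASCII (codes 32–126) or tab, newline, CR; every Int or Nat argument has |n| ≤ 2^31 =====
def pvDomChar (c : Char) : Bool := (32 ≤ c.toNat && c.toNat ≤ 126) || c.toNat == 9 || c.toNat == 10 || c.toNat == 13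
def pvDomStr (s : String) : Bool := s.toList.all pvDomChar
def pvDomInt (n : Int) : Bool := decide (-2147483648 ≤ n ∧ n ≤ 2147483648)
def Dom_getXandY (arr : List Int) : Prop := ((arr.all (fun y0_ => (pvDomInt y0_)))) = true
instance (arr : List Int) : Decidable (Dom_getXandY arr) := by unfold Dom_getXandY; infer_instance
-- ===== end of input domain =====

-- B sorts the array once and decides "i is a double of some element" by parity plus a
-- hand-written binary search for i//2 in the sorted copy, instead of A's hash set of
-- doubled values; objective: alternative (sorted array + binary search vs hash set).


-- ===== PORT A =====
def getXandY (arr : List Int) : List (List Int) :=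
  let set1 := arr.foldl (fun s i => PySem.Set.add s (2*i)) PySem.Set.empty
  arr.foldl (fun ans i =>
    if PySem.Set.contains set1 i then ans ++ [[i, PySem.Int.floordiv i 2]] else ans) []

-- ===== PORT B =====
-- the while-loop of _bsearch; lo/hi are list indices, always 0 ≤ lo ≤ hi ≤ len, so Nat is
-- exact; srt.getD mid 0 is exact for srt[mid] because lo ≤ mid < hi ≤ len keeps it in range
def bsLoop (srt : List Int) (x : Int) (lo hi : Nat) : Nat :=
  if lo < hi then
    let mid := (lo + hi) / 2
    if srt.getD mid 0 < x then bsLoop srt x (mid + 1) hi else bsLoop srt x lo mid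
  else lo
termination_by hi - lo
decreasing_by all_goals omega

-- _bsearch(srt, x); srt.getD lo 0 exact since it is only read when lo < len
def bsearch (srt : List Int) (x : Int) : Bool :=
  let lo := bsLoop srt x 0 srt.length
  decide (lo < srt.length) && (srt.getD lo 0 == x)

def getXandY_alt (arr : List Int) : List (List Int) :=
  let srt := PySem.List.sorted arr (fun v => v) false
  arr.foldl (fun ans i =>
    if PySem.Int.mod i 2 == 0 && bsearch srt (PySem.Int.floordiv i 2)
    then ans ++ [[i, PySem.Int.floordiv i 2]] else ans) []

-- ===== PRECONDITION & SPEC =====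
def Spec_getXandY (arr : List Int) (out : List (List Int)) : Prop := out = getXandY_alt arr
instance (arr : List Int) (out : List (List Int)) : Decidable (Spec_getXandY arr out) := by unfold Spec_getXandY; infer_instance

-- ===== CLAIM (what is proved, stated in full; the proofs are below) =====
def Claim_equal_getXandY : Prop := ∀ (arr : List Int), Dom_getXandY arr → Spec_getXandY arr (getXandY arr)

-- ===== LEMMAS AND PROOFS =====

-- monotone access on a ≤-sorted list
theorem getD_mono (srt : List Int) (hs : srt.Pairwise (· ≤ ·)) {p q : Nat}
    (hpq : p ≤ q) (hq : q < srt.length) : srt.getD p 0 ≤ srt.getD q 0 := by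
  rcases Nat.lt_or_eq_of_le hpq with h | rfl
  · rw [srt.getD_eq_getElem 0 (by omega), srt.getD_eq_getElem 0 hq]
    exact List.pairwise_iff_getElem.mp hs p q _ _ h
  · exact le_refl _

-- invariant of the binary-search loop: below the result everything is < x,
-- from the result on everything is ≥ x
theorem bsLoop_spec (srt : List Int) (hs : srt.Pairwise (· ≤ ·)) (x : Int) :
    ∀ n lo hi, hi - lo = n → lo ≤ hi → hi ≤ srt.length →
    (∀ k, k < lo → srt.getD k 0 < x) →
    (∀ k, hi ≤ k → k < srt.length → x ≤ srt.getD k 0) →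
    bsLoop srt x lo hi ≤ srt.length ∧
    (∀ k, k < bsLoop srt x lo hi → srt.getD k 0 < x) ∧
    (∀ k, bsLoop srt x lo hi ≤ k → k < srt.length → x ≤ srt.getD k 0) := by
  intro n
  induction n using Nat.strong_induction_on with
  | _ n ih =>
    intro lo hi hn hle hhi hlow hhigh
    rw [bsLoop]
    by_cases h : lo < hi
    · simp only [h, if_true]
      by_cases hm : srt.getD ((lo + hi) / 2) 0 < x
      · simp only [hm, if_true]
        refine ih (hi - ((lo + hi) / 2 + 1)) (by omega) _ _ rfl (by omega) hhi ?_ hhigh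
        intro k hk
        by_cases hklo : k < lo
        · exact hlow k hklo
        · exact lt_of_le_of_lt (getD_mono srt hs (by omega) (by omega)) hm
      · simp only [hm, if_false]
        refine ih (((lo + hi) / 2) - lo) (by omega) _ _ rfl (by omega) (by omega) hlow ?_
        intro k hk hklen
        exact le_trans (le_of_not_gt hm) (getD_mono srt hs hk hklen)
    · simp only [h, if_false]
      exact ⟨by omega, fun k hk => hlow k (by omega), fun k hk hl => hhigh k (by omega) hl⟩

-- binary search on a ≤-sorted list is membership
theorem bsearch_mem (srt : List Int) (hs : srt.Pairwise (· ≤ ·)) (x : Int) :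
    bsearch srt x = true ↔ x ∈ srt := by
  obtain ⟨h1, h2, h3⟩ := bsLoop_spec srt hs x (srt.length - 0) 0 srt.length rfl
    (Nat.zero_le _) (le_refl _) (by omega) (by omega)
  unfold bsearch
  simp only [Bool.and_eq_true, decide_eq_true_eq, beq_iff_eq]
  constructor
  · rintro ⟨hlt, heq⟩
    rw [srt.getD_eq_getElem 0 hlt] at heq
    exact heq ▸ List.getElem_mem hlt
  · intro hx
    obtain ⟨k, hk, hkx⟩ := List.mem_iff_getElem.mp hx
    have hkr : ¬ k < bsLoop srt x 0 srt.length := by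
      intro hlt
      have := h2 k hlt
      rw [srt.getD_eq_getElem 0 hk] at this
      omega
    have hrlt : bsLoop srt x 0 srt.length < srt.length := by omega
    refine ⟨hrlt, ?_⟩
    have hge := h3 _ (le_refl _) hrlt
    have hle := getD_mono srt hs (by omega : bsLoop srt x 0 srt.length ≤ k) hk
    rw [srt.getD_eq_getElem 0 hk, hkx] at hle
    rw [srt.getD_eq_getElem 0 hrlt] at hge hle ⊢
    omega

-- A's accumulated set of doubles is set(2*j for j in arr)
theorem set1_eq (arr : List Int) :
    arr.foldl (fun s i => PySem.Set.add s (2*i)) PySem.Set.empty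
      = PySem.Set.ofList (arr.map (fun j => 2*j)) := by
  rw [← PySem.Set.update_map_eq_foldl_add]
  exact PySem.Set.update_nil_left _

-- membership in the doubled set = parity + binary search for the half in sorted(arr)
theorem cond_eq (arr : List Int) (i : Int) :
    PySem.Set.contains (PySem.Set.ofList (arr.map (fun j => 2*j))) i
      = (PySem.Int.mod i 2 == 0 && bsearch (PySem.List.sorted arr (fun v => v) false) (PySem.Int.floordiv i 2)) := by
  rw [Bool.eq_iff_iff]
  simp only [Bool.and_eq_true, beq_iff_eq,
    bsearch_mem _ (PySem.List.sorted_pairwise arr (fun v => v)) _,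
    PySem.List.mem_sorted, PySem.Set.contains_iff, PySem.Set.mem_ofList, List.mem_map,
    PySem.Int.mod_eq_emod_of_pos (by norm_num : (0:Int) < 2),
    PySem.Int.floordiv_eq_ediv_of_pos (by norm_num : (0:Int) < 2)]
  constructor
  · rintro ⟨j, hj, rfl⟩
    refine ⟨by omega, ?_⟩
    simpa [Int.mul_ediv_cancel_left j (by norm_num : (2:Int) ≠ 0)] using hj
  · rintro ⟨he, hm⟩
    exact ⟨i / 2, hm, by omega⟩

-- ===== VERDICT (by name: the statement is the Claim_ definition above) =====
theorem getXandY_spec : Claim_equal_getXandY := by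
  intro arr _
  unfold Spec_getXandY getXandY getXandY_alt
  simp only [set1_eq, cond_eq]
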